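-- pv_equiv track=rewrite | github.com/Nyptop/POPI-Project | battleships.py | check_if_hits
-- ===== SOURCE A (Python) =====
-- def check_if_hits(row, column, fleet):
--     """for each ship in the fleet, checks whether the hit coordinates are in that ship"""
--     for ship in fleet:
--
--         horizontal = ship[2]
--         shipRow = ship[0]
--         shipCol = ship[1]
--         shipLength = ship[3]
--         shipRowCoords = None
--         ShipColCoords = None
--
--         if horizontal == True:
--             shipColCoords = range(shipCol, shipCol+shipLength) #finding the coordinates of a horizontal ship
--             shipRowCoords = range(shipRow,shipRow+1)
--         else:
--             shipColCoords = range(shipCol, shipCol+1) #finding the coordinates of a vertical ship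
--             shipRowCoords = range(shipRow,shipRow+shipLength)
--
--         if (row in shipRowCoords) and (column in shipColCoords):
--             return True
--
--     return False
-- ===== SOURCE B (Python) =====
-- def check_if_hits(row, column, fleet):
--     """index the fleet once: per hit-row column-intervals and per hit-column row-intervals, then query"""
--     by_row = {}
--     by_col = {}
--     for ship in fleet:
--         shipRow, shipCol, orientation, shipLength = ship[0], ship[1], ship[2], ship[3]
--         if orientation == True:
--             by_row.setdefault(shipRow, []).append((shipCol, shipCol + shipLength))
--         else:
--             by_col.setdefault(shipCol, []).append((shipRow, shipRow + shipLength))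
--     return (any(lo <= column < hi for lo, hi in by_row.get(row, []))
--             or any(lo <= row < hi for lo, hi in by_col.get(column, [])))
-- ===== Notes on version B (the rewrite author's own statement) =====
-- stated objective: alternative
-- what changed: A scans ship by ship testing the hit against each ship's row/column ranges with an early return; B first builds two dictionaries indexing the fleet (column-intervals per row for horizontal ships, row-intervals per column for vertical ones) and then answers by two keyed lookups, examining only the intervals filed under the hit's row and column.
import Mathlib
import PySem

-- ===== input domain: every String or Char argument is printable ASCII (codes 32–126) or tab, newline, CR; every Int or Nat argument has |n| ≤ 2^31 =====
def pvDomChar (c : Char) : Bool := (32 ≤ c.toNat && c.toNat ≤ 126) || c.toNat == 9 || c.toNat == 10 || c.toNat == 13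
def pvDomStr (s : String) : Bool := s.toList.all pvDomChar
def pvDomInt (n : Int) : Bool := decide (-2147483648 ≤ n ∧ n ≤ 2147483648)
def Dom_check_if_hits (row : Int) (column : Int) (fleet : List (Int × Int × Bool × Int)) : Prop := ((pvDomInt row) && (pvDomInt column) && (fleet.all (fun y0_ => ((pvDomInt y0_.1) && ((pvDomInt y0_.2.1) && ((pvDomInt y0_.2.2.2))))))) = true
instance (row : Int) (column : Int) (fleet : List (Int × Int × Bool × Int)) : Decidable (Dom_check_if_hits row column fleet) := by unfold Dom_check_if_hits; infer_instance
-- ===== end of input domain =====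

-- B indexes the fleet once into per-row/per-column interval dictionaries and answers by keyed lookup, instead of A's scan testing every ship; return values proven equal.


-- ===== PORT A =====
-- 'x in range(a, b)' (step 1) is ported as the arithmetic test a ≤ x ∧ x < b — exactly
-- Python's range membership (range is a lazy object; 'in' on it is this comparison).
def check_if_hits (row : Int) (column : Int) (fleet : List (Int × Int × Bool × Int)) : Bool :=
  match fleet with
  | [] => false
  | ship :: rest =>
    let horizontal := ship.2.2.1
    let shipRow := ship.1
    let shipCol := ship.2.1
    let shipLength := ship.2.2.2
    -- (shipRowCoords, shipColCoords) as (lo, hi) interval pairs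
    let coords :=
      if horizontal == true then
        ((shipRow, shipRow + 1), (shipCol, shipCol + shipLength))
      else
        ((shipRow, shipRow + shipLength), (shipCol, shipCol + 1))
    if decide (coords.1.1 ≤ row ∧ row < coords.1.2) && decide (coords.2.1 ≤ column ∧ column < coords.2.2) then
      true
    else
      check_if_hits row column rest

-- ===== PORT B =====
-- one loop step of B: file the ship's covered interval under its fixed coordinate
def pvStep (p : PySem.Dict Int (List (Int × Int)) × PySem.Dict Int (List (Int × Int)))
    (ship : Int × Int × Bool × Int) :
    PySem.Dict Int (List (Int × Int)) × PySem.Dict Int (List (Int × Int)) :=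
  if ship.2.2.1 == true then
    (p.1.modify ship.1 [] (· ++ [(ship.2.1, ship.2.1 + ship.2.2.2)]), p.2)
  else
    (p.1, p.2.modify ship.2.1 [] (· ++ [(ship.1, ship.1 + ship.2.2.2)]))

def check_if_hits_alt (row : Int) (column : Int) (fleet : List (Int × Int × Bool × Int)) : Bool :=
  let idx := fleet.foldl pvStep (PySem.Dict.empty, PySem.Dict.empty)
  ((idx.1.getD row []).any (fun iv => decide (iv.1 ≤ column ∧ column < iv.2))) ||
  ((idx.2.getD column []).any (fun iv => decide (iv.1 ≤ row ∧ row < iv.2)))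

-- ===== PRECONDITION & SPEC =====
def Spec_check_if_hits (row : Int) (column : Int) (fleet : List (Int × Int × Bool × Int)) (out : Bool) : Prop := out = check_if_hits_alt row column fleet
instance (row : Int) (column : Int) (fleet : List (Int × Int × Bool × Int)) (out : Bool) : Decidable (Spec_check_if_hits row column fleet out) := by unfold Spec_check_if_hits; infer_instance

-- ===== CLAIM (what is proved, stated in full; the proofs are below) =====
def Claim_equal_check_if_hits : Prop := ∀ (row : Int) (column : Int) (fleet : List (Int × Int × Bool × Int)), Dom_check_if_hits row column fleet → Spec_check_if_hits row column fleet (check_if_hits row column fleet)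

-- ===== LEMMAS AND PROOFS =====

-- a horizontal / vertical ship covers the cell (row, column)
def pvCovH (row column : Int) (s : Int × Int × Bool × Int) : Prop :=
  s.2.2.1 = true ∧ s.1 = row ∧ s.2.1 ≤ column ∧ column < s.2.1 + s.2.2.2

def pvCovV (row column : Int) (s : Int × Int × Bool × Int) : Prop :=
  ¬ s.2.2.1 = true ∧ s.2.1 = column ∧ s.1 ≤ row ∧ row < s.1 + s.2.2.2

-- ∃ over an appended singleton splits
theorem pvExAppend {α : Type} (L : List α) (x : α) (P : α → Prop) :
    (∃ iv ∈ L ++ [x], P iv) ↔ (∃ iv ∈ L, P iv) ∨ P x := by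
  simp [List.mem_append, or_and_right, exists_or]

-- what B's index fold puts where
theorem fold_spec (row column : Int) (fleet : List (Int × Int × Bool × Int))
    (p : PySem.Dict Int (List (Int × Int)) × PySem.Dict Int (List (Int × Int))) :
    ((∃ iv ∈ (fleet.foldl pvStep p).1.getD row [], iv.1 ≤ column ∧ column < iv.2) ↔
      (∃ iv ∈ p.1.getD row [], iv.1 ≤ column ∧ column < iv.2) ∨ ∃ s ∈ fleet, pvCovH row column s) ∧
    ((∃ iv ∈ (fleet.foldl pvStep p).2.getD column [], iv.1 ≤ row ∧ row < iv.2) ↔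
      (∃ iv ∈ p.2.getD column [], iv.1 ≤ row ∧ row < iv.2) ∨ ∃ s ∈ fleet, pvCovV row column s) := by
  induction fleet generalizing p with
  | nil => simp
  | cons ship rest ih =>
    simp only [List.foldl_cons, List.mem_cons, exists_eq_or_imp]
    rcases ih (pvStep p ship) with ⟨ih1, ih2⟩
    rw [ih1, ih2]
    unfold pvStep
    by_cases hh : ship.2.2.1 = true
    · rw [if_pos (by simp [hh])]
      have hH : pvCovH row column ship ↔
          ship.1 = row ∧ ship.2.1 ≤ column ∧ column < ship.2.1 + ship.2.2.2 := by
        simp [pvCovH, hh]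
      have hV : pvCovV row column ship ↔ False := by simp [pvCovV, hh]
      simp only [hH, hV, false_or, PySem.Dict.getD_modify]
      refine ⟨?_, by trivial⟩
      by_cases hr : row = ship.1
      · subst hr
        rw [if_pos rfl, pvExAppend]
        constructor
        · rintro ((h | h) | h)
          · exact Or.inl h
          · exact Or.inr (Or.inl ⟨rfl, h⟩)
          · exact Or.inr (Or.inr h)
        · rintro (h | ⟨_, h⟩ | h)
          · exact Or.inl (Or.inl h)
          · exact Or.inl (Or.inr h)
          · exact Or.inr h
      · rw [if_neg hr]
        constructor
        · rintro (h | h)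
          · exact Or.inl h
          · exact Or.inr (Or.inr h)
        · rintro (h | ⟨he, _⟩ | h)
          · exact Or.inl h
          · exact absurd he.symm hr
          · exact Or.inr h
    · rw [if_neg (by simp [hh])]
      have hH : pvCovH row column ship ↔ False := by simp [pvCovH, hh]
      have hV : pvCovV row column ship ↔
          ship.2.1 = column ∧ ship.1 ≤ row ∧ row < ship.1 + ship.2.2.2 := by
        simp [pvCovV, hh]
      simp only [hH, hV, false_or, PySem.Dict.getD_modify]
      refine ⟨by trivial, ?_⟩
      by_cases hc : column = ship.2.1
      · subst hc
        rw [if_pos rfl, pvExAppend]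
        constructor
        · rintro ((h | h) | h)
          · exact Or.inl h
          · exact Or.inr (Or.inl ⟨rfl, h⟩)
          · exact Or.inr (Or.inr h)
        · rintro (h | ⟨_, h⟩ | h)
          · exact Or.inl (Or.inl h)
          · exact Or.inl (Or.inr h)
          · exact Or.inr h
      · rw [if_neg hc]
        constructor
        · rintro (h | h)
          · exact Or.inl h
          · exact Or.inr (Or.inr h)
        · rintro (h | ⟨he, _⟩ | h)
          · exact Or.inl h
          · exact absurd he.symm hc
          · exact Or.inr h

-- A returns true iff some ship covers the cell
theorem check_if_hits_iff (row column : Int) (fleet : List (Int × Int × Bool × Int)) :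
    check_if_hits row column fleet = true ↔
      ∃ s ∈ fleet, pvCovH row column s ∨ pvCovV row column s := by
  induction fleet with
  | nil => simp [check_if_hits]
  | cons ship rest ih =>
    simp only [check_if_hits, List.mem_cons, exists_eq_or_imp]
    by_cases hh : ship.2.2.1 = true
    · by_cases hc : (ship.1 ≤ row ∧ row < ship.1 + 1) ∧ ship.2.1 ≤ column ∧ column < ship.2.1 + ship.2.2.2
      · rw [if_pos (by simp [hh]; omega)]
        exact iff_of_true rfl (Or.inl (Or.inl ⟨hh, by omega, hc.2⟩))
      · rw [if_neg (by simp [hh]; omega), ih]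
        constructor
        · exact fun h => Or.inr h
        · rintro (hcv | h)
          · rcases hcv with ⟨_, h1, h2⟩ | ⟨hF, _⟩
            · exact absurd ⟨⟨le_of_eq h1, by omega⟩, h2⟩ hc
            · exact absurd hh hF
          · exact h
    · by_cases hc : (ship.1 ≤ row ∧ row < ship.1 + ship.2.2.2) ∧ ship.2.1 ≤ column ∧ column < ship.2.1 + 1
      · rw [if_pos (by simp [hh]; omega)]
        exact iff_of_true rfl (Or.inl (Or.inr ⟨hh, by omega, hc.1⟩))
      · rw [if_neg (by simp [hh]; omega), ih]
        constructor
        · exact fun h => Or.inr h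
        · rintro (hcv | h)
          · rcases hcv with ⟨hF, _⟩ | ⟨_, h1, h2⟩
            · exact absurd hF hh
            · exact absurd ⟨h2, le_of_eq h1, by omega⟩ hc
          · exact h

-- ===== VERDICT (by name: the statement is the Claim_ definition above) =====
theorem check_if_hits_spec : Claim_equal_check_if_hits := by
  intro row column fleet _
  unfold Spec_check_if_hits check_if_hits_alt
  rcases fold_spec row column fleet (PySem.Dict.empty, PySem.Dict.empty) with ⟨h1, h2⟩
  rw [Bool.eq_iff_iff, check_if_hits_iff]
  simp only [Bool.or_eq_true, List.any_eq_true, decide_eq_true_eq]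
  rw [h1, h2]
  simp only [PySem.Dict.getD_empty, List.not_mem_nil, false_and, exists_false, false_or]
  constructor
  · rintro ⟨s, hs, h | h⟩
    · exact Or.inl ⟨s, hs, h⟩
    · exact Or.inr ⟨s, hs, h⟩
  · rintro (⟨s, hs, h⟩ | ⟨s, hs, h⟩)
    · exact ⟨s, hs, Or.inl h⟩
    · exact ⟨s, hs, Or.inr h⟩
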